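-- pv_equiv track=rewrite | github.com/ambr-0-se/DeepResearchMetaAgent | src/utils/token_utils.py | normalize_model_id_for_tiktoken
-- ===== SOURCE A (Python) =====
-- def normalize_model_id_for_tiktoken(model_id: str | None) -> str:
--     """Strip vendor prefixes so ``tiktoken.encoding_for_model`` can resolve known OpenAI names."""
--     if not model_id:
--         return "gpt-4o"
--     s = model_id.strip()
--     for prefix in ("anthropic/", "openai/", "google/", "gemini/", "azure/", "vertex_ai/"):
--         if s.lower().startswith(prefix):
--             s = s[len(prefix) :]
--             break
--     return s or "gpt-4o"
-- ===== SOURCE B (Python) =====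
-- def normalize_model_id_for_tiktoken(model_id):
--     """Strip vendor prefixes so ``tiktoken.encoding_for_model`` can resolve known OpenAI names."""
--     if not model_id:
--         return "gpt-4o"
--     s = model_id.strip()
--     head, sep, tail = s.partition("/")
--     if sep and head.lower() in {"anthropic", "openai", "google", "gemini", "azure", "vertex_ai"}:
--         s = tail
--     return s or "gpt-4o"
-- ===== Notes on version B (the rewrite author's own statement) =====
-- stated objective: idiomatic
-- what changed: Instead of scanning six vendor prefixes with lowercased startswith and slicing by prefix length, B partitions the string once at the first slash and does a single set-membership test on the lowercased vendor segment.
import Mathlib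
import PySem

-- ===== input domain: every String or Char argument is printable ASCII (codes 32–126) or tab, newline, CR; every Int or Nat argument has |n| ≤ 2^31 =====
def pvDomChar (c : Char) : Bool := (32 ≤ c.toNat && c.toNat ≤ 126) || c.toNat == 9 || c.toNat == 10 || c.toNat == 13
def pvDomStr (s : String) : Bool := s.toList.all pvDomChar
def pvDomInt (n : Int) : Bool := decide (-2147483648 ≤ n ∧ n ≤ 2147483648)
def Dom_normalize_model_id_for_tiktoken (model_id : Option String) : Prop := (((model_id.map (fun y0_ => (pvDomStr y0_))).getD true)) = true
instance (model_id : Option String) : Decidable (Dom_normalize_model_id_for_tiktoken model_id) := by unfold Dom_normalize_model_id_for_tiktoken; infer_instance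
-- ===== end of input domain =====

-- B replaces A's scan over six lowercased startswith prefixes by a single split at the first slash
-- and one set lookup of the lowercased vendor segment (idiomatic; same behaviour, similar cost).

-- ===== PORT A =====
def normalize_model_id_for_tiktoken (model_id : Option String) : String :=
  match model_id with
  | none => "gpt-4o"
  | some m =>
    if m = "" then "gpt-4o"
    else
      let s := PySem.Str.strip m
      let st := ["anthropic/", "openai/", "google/", "gemini/", "azure/", "vertex_ai/"].foldl
        (fun (st : String × Bool) pre =>
          if st.2 then st
          else if PySem.Str.startswith (PySem.Str.lower st.1) pre then
            (PySem.Str.slice st.1 (some (PySem.Str.len pre)) none, true)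
          else st) (s, false)
      if st.1 = "" then "gpt-4o" else st.1

-- ===== PORT B =====
def pvVendors : PySem.Set String :=
  PySem.Set.ofList ["anthropic", "openai", "google", "gemini", "azure", "vertex_ai"]

-- s.partition("/") is ported by hand via the first-occurrence find (exact: CPython's
-- str.partition splits at the first occurrence of the separator, or keeps s whole).
def normalize_model_id_for_tiktoken_alt (model_id : Option String) : String :=
  match model_id with
  | none => "gpt-4o"
  | some m =>
    if m = "" then "gpt-4o"
    else
      let s := PySem.Str.strip m
      let i := PySem.Str.find s "/"
      let s :=
        if i = -1 then s
        else
          let head := PySem.Str.slice s none (some i)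
          let tail := PySem.Str.slice s (some (i + 1)) none
          if PySem.Set.contains pvVendors (PySem.Str.lower head) then tail else s
      if s = "" then "gpt-4o" else s

-- ===== PRECONDITION & SPEC =====
def Spec_normalize_model_id_for_tiktoken (model_id : Option String) (out : String) : Prop := out = normalize_model_id_for_tiktoken_alt model_id
instance (model_id : Option String) (out : String) : Decidable (Spec_normalize_model_id_for_tiktoken model_id out) := by unfold Spec_normalize_model_id_for_tiktoken; infer_instance

-- ===== CLAIM (what is proved, stated in full; the proofs are below) =====
def Claim_equal_normalize_model_id_for_tiktoken : Prop := ∀ (model_id : Option String), Dom_normalize_model_id_for_tiktoken model_id → Spec_normalize_model_id_for_tiktoken model_id (normalize_model_id_for_tiktoken model_id)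

-- ===== LEMMAS AND PROOFS =====

lemma pv_lowerChar_slash (c : Char) : PySem.Chars.lowerChar c = '/' ↔ c = '/' := by
  unfold PySem.Chars.lowerChar PySem.Chars.isupper
  split_ifs with hu
  · rw [Bool.and_eq_true, decide_eq_true_iff, decide_eq_true_iff] at hu
    have h1 : 65 ≤ c.toNat := Nat.succ_le_of_lt hu.1
    have h2 : c.toNat ≤ 90 := hu.2
    constructor
    · intro h
      exfalso
      have h3 := congrArg Char.toNat h
      rw [Char.toNat_ofNat] at h3
      have h47 : ('/' : Char).toNat = 47 := rfl
      rw [h47] at h3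
      split_ifs at h3
      all_goals omega
    · intro h
      subst h
      exfalso
      have h47 : ('/' : Char).toNat = 47 := rfl
      omega
  · exact Iff.rfl

lemma pv_singleton_prefix (a : Char) (l : List Char) : [a] <+: l ↔ l.head? = some a := by
  cases l with
  | nil => simp
  | cons x xs => simp [List.cons_prefix_cons, eq_comm]

lemma pv_key (t v : List Char) (hv : '/' ∉ v) :
    (PySem.Chars.startswith (PySem.Chars.lower t) (v ++ ['/']) = true) ↔
      (PySem.Chars.find t ['/'] = (v.length : Int) ∧
        PySem.Chars.lower (t.take v.length) = v) := by
  have hlow : ∀ l : List Char, PySem.Chars.lower l = l.map PySem.Chars.lowerChar := fun _ => rfl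
  have hocc : ∀ j : ℕ, (['/'] <+: t.drop j) ↔ t[j]? = some '/' := by
    intro j
    rw [pv_singleton_prefix, List.head?_drop]
  rw [PySem.Chars.startswith_iff, hlow]
  constructor
  · rintro ⟨r, hr⟩
    rw [List.append_assoc] at hr
    -- hr : v ++ ('/' :: r) = t.map lowerChar
    have hn : t[v.length]? = some '/' := by
      have h := congrArg (fun l => l[v.length]?) hr
      simp only [List.getElem?_map] at h
      rw [List.getElem?_append_right (le_refl _)] at h
      simp only [Nat.sub_self, List.singleton_append, List.getElem?_cons_zero] at h
      cases ht : t[v.length]? with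
      | none => rw [ht] at h; simp at h
      | some c =>
        rw [ht] at h
        simp only [Option.map_some, Option.some.injEq] at h
        exact congrArg some ((pv_lowerChar_slash c).mp h.symm)
    have hbelow : ∀ i < v.length, t[i]? ≠ some '/' := by
      intro i hi hti
      have h := congrArg (fun l => l[i]?) hr
      simp only [List.getElem?_map] at h
      rw [List.getElem?_append_left hi, hti] at h
      have hvi : v[i]? = some '/' := by
        rw [h]; rfl
      exact hv (List.mem_of_getElem? hvi)
    have hpos : 0 ≤ PySem.Chars.find t ['/'] := by
      rw [PySem.Chars.find_nonneg_iff, ← PySem.Chars.isIn_iff_infix,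
        ← PySem.Chars.exists_prefix_drop_iff_isIn]
      exact ⟨v.length, (hocc _).mpr hn⟩
    obtain ⟨hk1, hk2⟩ := PySem.Chars.find_spec hpos
    set k := (PySem.Chars.find t ['/']).toNat with hkdef
    have hkn : k = v.length := by
      by_contra hne
      rcases Nat.lt_or_ge k v.length with hlt | hge
      · exact hbelow k hlt ((hocc k).mp hk1)
      · exact hk2 v.length (lt_of_le_of_ne hge (fun e => hne e.symm)) ((hocc _).mpr hn)
    constructor
    · rw [← Int.toNat_of_nonneg hpos]
      exact_mod_cast hkn
    · have := congrArg (fun l => l.take v.length) hr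
      simp only at this
      rw [← List.map_take] at this
      rw [List.take_append_of_le_length (le_refl _), List.take_length] at this
      exact this.symm
  · rintro ⟨hf, hl⟩
    have hpos : 0 ≤ PySem.Chars.find t ['/'] := by rw [hf]; positivity
    obtain ⟨hk1, _⟩ := PySem.Chars.find_spec hpos
    rw [hf] at hk1
    simp only [Int.toNat_natCast] at hk1
    have hn : t[v.length]? = some '/' := (hocc _).mp hk1
    have hlen : v.length < t.length := by
      by_contra hge
      simp [List.getElem?_eq_none (show t.length ≤ v.length by omega)] at hn
    refine ⟨(t.drop (v.length + 1)).map PySem.Chars.lowerChar, ?_⟩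
    have hsplit : t = t.take v.length ++ t.drop v.length := (List.take_append_drop _ _).symm
    conv_rhs => rw [hsplit]
    rw [List.drop_eq_getElem_cons hlen]
    have hc : t[v.length] = '/' := by
      have := List.getElem?_eq_getElem hlen
      rw [hn] at this
      exact (Option.some.injEq _ _).mp this.symm
    rw [hc]
    rw [List.map_append, List.map_cons]
    rw [hlow] at hl
    rw [hl]
    simp [(pv_lowerChar_slash '/').mpr rfl]

lemma pv_key2 (t v : List Char) (hv : '/' ∉ v) (hge : 0 ≤ PySem.Chars.find t ['/']) :
    (PySem.Chars.startswith (PySem.Chars.lower t) (v ++ ['/']) = true) ↔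
      PySem.Chars.lower (t.take (PySem.Chars.find t ['/']).toNat) = v := by
  have hlow : ∀ l : List Char, PySem.Chars.lower l = l.map PySem.Chars.lowerChar := fun _ => rfl
  have hkle : (PySem.Chars.find t ['/']).toNat ≤ t.length := by
    have := PySem.Chars.find_le_length t ['/']
    omega
  rw [pv_key t v hv]
  constructor
  · rintro ⟨h1, h2⟩
    have hk : (PySem.Chars.find t ['/']).toNat = v.length := by omega
    rw [hk]
    exact h2
  · intro hL
    have hlen : (PySem.Chars.lower (t.take (PySem.Chars.find t ['/']).toNat)).length
        = (PySem.Chars.find t ['/']).toNat := by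
      rw [hlow, List.length_map, List.length_take]
      omega
    have hkv : v.length = (PySem.Chars.find t ['/']).toNat := by rw [← hL, hlen]
    constructor
    · omega
    · rw [hkv]
      exact hL

lemma pv_mid (s : String) :
    (List.foldl
      (fun (st : String × Bool) pre =>
        if st.2 then st
        else if PySem.Str.startswith (PySem.Str.lower st.1) pre then
          (PySem.Str.slice st.1 (some (PySem.Str.len pre)) none, true)
        else st)
      (s, false) ["anthropic/", "openai/", "google/", "gemini/", "azure/", "vertex_ai/"]).1 =
    (if PySem.Str.find s "/" = -1 then s
     else
       if PySem.Set.contains pvVendors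
           (PySem.Str.lower (PySem.Str.slice s none (some (PySem.Str.find s "/")))) then
         PySem.Str.slice s (some (PySem.Str.find s "/" + 1)) none
       else s) := by
  have hlow : ∀ l : List Char, PySem.Chars.lower l = l.map PySem.Chars.lowerChar := fun _ => rfl
  have hfind : PySem.Str.find s "/" = PySem.Chars.find s.toList ['/'] := by
    rw [PySem.Str.find_eq]
    rfl
  by_cases hneg : PySem.Chars.find s.toList ['/'] = -1
  · have c1 : PySem.Chars.startswith (PySem.Chars.lower s.toList) ['a', 'n', 't', 'h', 'r', 'o', 'p', 'i', 'c', '/'] = false := by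
      rw [← Bool.not_eq_true,
        show (['a', 'n', 't', 'h', 'r', 'o', 'p', 'i', 'c', '/'] : List Char) = ['a', 'n', 't', 'h', 'r', 'o', 'p', 'i', 'c'] ++ ['/'] from rfl,
        pv_key _ _ (by decide)]
      rintro ⟨h, -⟩
      rw [hneg] at h
      exact absurd h (by decide)
    have c2 : PySem.Chars.startswith (PySem.Chars.lower s.toList) ['o', 'p', 'e', 'n', 'a', 'i', '/'] = false := by
      rw [← Bool.not_eq_true,
        show (['o', 'p', 'e', 'n', 'a', 'i', '/'] : List Char) = ['o', 'p', 'e', 'n', 'a', 'i'] ++ ['/'] from rfl,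
        pv_key _ _ (by decide)]
      rintro ⟨h, -⟩
      rw [hneg] at h
      exact absurd h (by decide)
    have c3 : PySem.Chars.startswith (PySem.Chars.lower s.toList) ['g', 'o', 'o', 'g', 'l', 'e', '/'] = false := by
      rw [← Bool.not_eq_true,
        show (['g', 'o', 'o', 'g', 'l', 'e', '/'] : List Char) = ['g', 'o', 'o', 'g', 'l', 'e'] ++ ['/'] from rfl,
        pv_key _ _ (by decide)]
      rintro ⟨h, -⟩
      rw [hneg] at h
      exact absurd h (by decide)
    have c4 : PySem.Chars.startswith (PySem.Chars.lower s.toList) ['g', 'e', 'm', 'i', 'n', 'i', '/'] = false := by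
      rw [← Bool.not_eq_true,
        show (['g', 'e', 'm', 'i', 'n', 'i', '/'] : List Char) = ['g', 'e', 'm', 'i', 'n', 'i'] ++ ['/'] from rfl,
        pv_key _ _ (by decide)]
      rintro ⟨h, -⟩
      rw [hneg] at h
      exact absurd h (by decide)
    have c5 : PySem.Chars.startswith (PySem.Chars.lower s.toList) ['a', 'z', 'u', 'r', 'e', '/'] = false := by
      rw [← Bool.not_eq_true,
        show (['a', 'z', 'u', 'r', 'e', '/'] : List Char) = ['a', 'z', 'u', 'r', 'e'] ++ ['/'] from rfl,
        pv_key _ _ (by decide)]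
      rintro ⟨h, -⟩
      rw [hneg] at h
      exact absurd h (by decide)
    have c6 : PySem.Chars.startswith (PySem.Chars.lower s.toList) ['v', 'e', 'r', 't', 'e', 'x', '_', 'a', 'i', '/'] = false := by
      rw [← Bool.not_eq_true,
        show (['v', 'e', 'r', 't', 'e', 'x', '_', 'a', 'i', '/'] : List Char) = ['v', 'e', 'r', 't', 'e', 'x', '_', 'a', 'i'] ++ ['/'] from rfl,
        pv_key _ _ (by decide)]
      rintro ⟨h, -⟩
      rw [hneg] at h
      exact absurd h (by decide)
    rw [hfind, if_pos hneg]
    simp [c1, c2, c3, c4, c5, c6]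
  · have hge : 0 ≤ PySem.Chars.find s.toList ['/'] := by
      have := PySem.Chars.neg_one_le_find (s := s.toList) (sub := ['/'])
      omega
    have hf : PySem.Chars.find s.toList ['/'] = ((PySem.Chars.find s.toList ['/']).toNat : Int) :=
      (Int.toNat_of_nonneg hge).symm
    have hkle : (PySem.Chars.find s.toList ['/']).toNat ≤ s.toList.length := by
      have := PySem.Chars.find_le_length s.toList ['/']
      omega
    have hx : (PySem.Str.lower (PySem.Str.slice s none (some (PySem.Str.find s "/")))).toList
        = PySem.Chars.lower (s.toList.take (PySem.Chars.find s.toList ['/']).toNat) := by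
      rw [PySem.Str.toList_lower, PySem.Str.toList_slice, PySem.Chars.slice_eq_listSlice,
        hfind, PySem.List.slice_to _ hge]
    have hlenL : (PySem.Chars.lower (s.toList.take (PySem.Chars.find s.toList ['/']).toNat)).length
        = (PySem.Chars.find s.toList ['/']).toNat := by
      rw [hlow, List.length_map, List.length_take]
      omega
    have d1 : PySem.Chars.startswith (PySem.Chars.lower s.toList) ['a', 'n', 't', 'h', 'r', 'o', 'p', 'i', 'c', '/'] = true ↔
        PySem.Chars.lower (s.toList.take (PySem.Chars.find s.toList ['/']).toNat) = ['a', 'n', 't', 'h', 'r', 'o', 'p', 'i', 'c'] := by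
      rw [show (['a', 'n', 't', 'h', 'r', 'o', 'p', 'i', 'c', '/'] : List Char) = ['a', 'n', 't', 'h', 'r', 'o', 'p', 'i', 'c'] ++ ['/'] from rfl]
      exact pv_key2 _ _ (by decide) hge
    have d2 : PySem.Chars.startswith (PySem.Chars.lower s.toList) ['o', 'p', 'e', 'n', 'a', 'i', '/'] = true ↔
        PySem.Chars.lower (s.toList.take (PySem.Chars.find s.toList ['/']).toNat) = ['o', 'p', 'e', 'n', 'a', 'i'] := by
      rw [show (['o', 'p', 'e', 'n', 'a', 'i', '/'] : List Char) = ['o', 'p', 'e', 'n', 'a', 'i'] ++ ['/'] from rfl]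
      exact pv_key2 _ _ (by decide) hge
    have d3 : PySem.Chars.startswith (PySem.Chars.lower s.toList) ['g', 'o', 'o', 'g', 'l', 'e', '/'] = true ↔
        PySem.Chars.lower (s.toList.take (PySem.Chars.find s.toList ['/']).toNat) = ['g', 'o', 'o', 'g', 'l', 'e'] := by
      rw [show (['g', 'o', 'o', 'g', 'l', 'e', '/'] : List Char) = ['g', 'o', 'o', 'g', 'l', 'e'] ++ ['/'] from rfl]
      exact pv_key2 _ _ (by decide) hge
    have d4 : PySem.Chars.startswith (PySem.Chars.lower s.toList) ['g', 'e', 'm', 'i', 'n', 'i', '/'] = true ↔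
        PySem.Chars.lower (s.toList.take (PySem.Chars.find s.toList ['/']).toNat) = ['g', 'e', 'm', 'i', 'n', 'i'] := by
      rw [show (['g', 'e', 'm', 'i', 'n', 'i', '/'] : List Char) = ['g', 'e', 'm', 'i', 'n', 'i'] ++ ['/'] from rfl]
      exact pv_key2 _ _ (by decide) hge
    have d5 : PySem.Chars.startswith (PySem.Chars.lower s.toList) ['a', 'z', 'u', 'r', 'e', '/'] = true ↔
        PySem.Chars.lower (s.toList.take (PySem.Chars.find s.toList ['/']).toNat) = ['a', 'z', 'u', 'r', 'e'] := by
      rw [show (['a', 'z', 'u', 'r', 'e', '/'] : List Char) = ['a', 'z', 'u', 'r', 'e'] ++ ['/'] from rfl]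
      exact pv_key2 _ _ (by decide) hge
    have d6 : PySem.Chars.startswith (PySem.Chars.lower s.toList) ['v', 'e', 'r', 't', 'e', 'x', '_', 'a', 'i', '/'] = true ↔
        PySem.Chars.lower (s.toList.take (PySem.Chars.find s.toList ['/']).toNat) = ['v', 'e', 'r', 't', 'e', 'x', '_', 'a', 'i'] := by
      rw [show (['v', 'e', 'r', 't', 'e', 'x', '_', 'a', 'i', '/'] : List Char) = ['v', 'e', 'r', 't', 'e', 'x', '_', 'a', 'i'] ++ ['/'] from rfl]
      exact pv_key2 _ _ (by decide) hge
    by_cases h1 : PySem.Chars.startswith (PySem.Chars.lower s.toList) ['a', 'n', 't', 'h', 'r', 'o', 'p', 'i', 'c', '/'] = true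
    · have hL := d1.mp h1
      have hcont : PySem.Set.contains pvVendors
          (PySem.Str.lower (PySem.Str.slice s none (some (PySem.Str.find s "/")))) = true := by
        rw [String.toList_inj.mp (show (PySem.Str.lower (PySem.Str.slice s none
          (some (PySem.Str.find s "/")))).toList = ("anthropic" : String).toList by rw [hx, hL]; rfl)]
        decide
      have hkv : (PySem.Chars.find s.toList ['/']).toNat = 9 := by
        have := congrArg List.length hL
        rw [hlenL] at this
        simpa using this
      have hfv : PySem.Str.find s "/" = 9 := by
        rw [hfind, hf, hkv]
        norm_num
      rw [hfind, if_neg hneg, ← hfind, if_pos hcont, hfv]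
      simp [h1, PySem.Str.len]
      norm_num [show ("anthropic/" : String).length = 10 from rfl]
    by_cases h2 : PySem.Chars.startswith (PySem.Chars.lower s.toList) ['o', 'p', 'e', 'n', 'a', 'i', '/'] = true
    · have hL := d2.mp h2
      have hcont : PySem.Set.contains pvVendors
          (PySem.Str.lower (PySem.Str.slice s none (some (PySem.Str.find s "/")))) = true := by
        rw [String.toList_inj.mp (show (PySem.Str.lower (PySem.Str.slice s none
          (some (PySem.Str.find s "/")))).toList = ("openai" : String).toList by rw [hx, hL]; rfl)]
        decide
      have hkv : (PySem.Chars.find s.toList ['/']).toNat = 6 := by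
        have := congrArg List.length hL
        rw [hlenL] at this
        simpa using this
      have hfv : PySem.Str.find s "/" = 6 := by
        rw [hfind, hf, hkv]
        norm_num
      rw [hfind, if_neg hneg, ← hfind, if_pos hcont, hfv]
      simp [h1, h2, PySem.Str.len]
      norm_num [show ("openai/" : String).length = 7 from rfl]
    by_cases h3 : PySem.Chars.startswith (PySem.Chars.lower s.toList) ['g', 'o', 'o', 'g', 'l', 'e', '/'] = true
    · have hL := d3.mp h3
      have hcont : PySem.Set.contains pvVendors
          (PySem.Str.lower (PySem.Str.slice s none (some (PySem.Str.find s "/")))) = true := by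
        rw [String.toList_inj.mp (show (PySem.Str.lower (PySem.Str.slice s none
          (some (PySem.Str.find s "/")))).toList = ("google" : String).toList by rw [hx, hL]; rfl)]
        decide
      have hkv : (PySem.Chars.find s.toList ['/']).toNat = 6 := by
        have := congrArg List.length hL
        rw [hlenL] at this
        simpa using this
      have hfv : PySem.Str.find s "/" = 6 := by
        rw [hfind, hf, hkv]
        norm_num
      rw [hfind, if_neg hneg, ← hfind, if_pos hcont, hfv]
      simp [h1, h2, h3, PySem.Str.len]
      norm_num [show ("google/" : String).length = 7 from rfl]
    by_cases h4 : PySem.Chars.startswith (PySem.Chars.lower s.toList) ['g', 'e', 'm', 'i', 'n', 'i', '/'] = true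
    · have hL := d4.mp h4
      have hcont : PySem.Set.contains pvVendors
          (PySem.Str.lower (PySem.Str.slice s none (some (PySem.Str.find s "/")))) = true := by
        rw [String.toList_inj.mp (show (PySem.Str.lower (PySem.Str.slice s none
          (some (PySem.Str.find s "/")))).toList = ("gemini" : String).toList by rw [hx, hL]; rfl)]
        decide
      have hkv : (PySem.Chars.find s.toList ['/']).toNat = 6 := by
        have := congrArg List.length hL
        rw [hlenL] at this
        simpa using this
      have hfv : PySem.Str.find s "/" = 6 := by
        rw [hfind, hf, hkv]
        norm_num
      rw [hfind, if_neg hneg, ← hfind, if_pos hcont, hfv]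
      simp [h1, h2, h3, h4, PySem.Str.len]
      norm_num [show ("gemini/" : String).length = 7 from rfl]
    by_cases h5 : PySem.Chars.startswith (PySem.Chars.lower s.toList) ['a', 'z', 'u', 'r', 'e', '/'] = true
    · have hL := d5.mp h5
      have hcont : PySem.Set.contains pvVendors
          (PySem.Str.lower (PySem.Str.slice s none (some (PySem.Str.find s "/")))) = true := by
        rw [String.toList_inj.mp (show (PySem.Str.lower (PySem.Str.slice s none
          (some (PySem.Str.find s "/")))).toList = ("azure" : String).toList by rw [hx, hL]; rfl)]
        decide
      have hkv : (PySem.Chars.find s.toList ['/']).toNat = 5 := by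
        have := congrArg List.length hL
        rw [hlenL] at this
        simpa using this
      have hfv : PySem.Str.find s "/" = 5 := by
        rw [hfind, hf, hkv]
        norm_num
      rw [hfind, if_neg hneg, ← hfind, if_pos hcont, hfv]
      simp [h1, h2, h3, h4, h5, PySem.Str.len]
      norm_num [show ("azure/" : String).length = 6 from rfl]
    by_cases h6 : PySem.Chars.startswith (PySem.Chars.lower s.toList) ['v', 'e', 'r', 't', 'e', 'x', '_', 'a', 'i', '/'] = true
    · have hL := d6.mp h6
      have hcont : PySem.Set.contains pvVendors
          (PySem.Str.lower (PySem.Str.slice s none (some (PySem.Str.find s "/")))) = true := by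
        rw [String.toList_inj.mp (show (PySem.Str.lower (PySem.Str.slice s none
          (some (PySem.Str.find s "/")))).toList = ("vertex_ai" : String).toList by rw [hx, hL]; rfl)]
        decide
      have hkv : (PySem.Chars.find s.toList ['/']).toNat = 9 := by
        have := congrArg List.length hL
        rw [hlenL] at this
        simpa using this
      have hfv : PySem.Str.find s "/" = 9 := by
        rw [hfind, hf, hkv]
        norm_num
      rw [hfind, if_neg hneg, ← hfind, if_pos hcont, hfv]
      simp [h1, h2, h3, h4, h5, h6, PySem.Str.len]
      norm_num [show ("vertex_ai/" : String).length = 10 from rfl]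
    have hcont : PySem.Set.contains pvVendors
        (PySem.Str.lower (PySem.Str.slice s none (some (PySem.Str.find s "/")))) = false := by
      rw [← Bool.not_eq_true]
      intro hc
      simp only [pvVendors, PySem.Set.contains, PySem.Set.ofList] at hc
      simp at hc
      rcases hc with h | h | h | h | h | h
      · exact h1 (d1.mpr (by rw [← hx]; rw [← hfind] at h; rw [h]; rfl))
      · exact h2 (d2.mpr (by rw [← hx]; rw [← hfind] at h; rw [h]; rfl))
      · exact h3 (d3.mpr (by rw [← hx]; rw [← hfind] at h; rw [h]; rfl))
      · exact h4 (d4.mpr (by rw [← hx]; rw [← hfind] at h; rw [h]; rfl))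
      · exact h5 (d5.mpr (by rw [← hx]; rw [← hfind] at h; rw [h]; rfl))
      · exact h6 (d6.mpr (by rw [← hx]; rw [← hfind] at h; rw [h]; rfl))
    rw [hfind, if_neg hneg, ← hfind, if_neg (by rw [hcont]; exact Bool.false_ne_true)]
    simp [h1, h2, h3, h4, h5, h6]

-- ===== VERDICT (by name: the statement is the Claim_ definition above) =====
theorem normalize_model_id_for_tiktoken_spec : Claim_equal_normalize_model_id_for_tiktoken := by
  intro model_id _
  unfold Spec_normalize_model_id_for_tiktoken
  cases model_id with
  | none => rfl
  | some m =>
    unfold normalize_model_id_for_tiktoken normalize_model_id_for_tiktoken_alt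
    by_cases hm : m = ""
    · simp [hm]
    · simp only [if_neg hm]
      rw [pv_mid (PySem.Str.strip m)]
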